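-- pv_equiv track=rewrite | github.com/alzorix/homework | EX23/new/7401.py | F
-- ===== SOURCE A (Python) =====
-- alll = set()
--
-- def F(start=2,end=70,history=[],plus=False):
--     alll.add(start)
--     history2 = list(history)
--     history2.append(start)
--
--     if start == end and ((16 in history and 8 in history) or 32 in history):
--         return 1
--     if start == end:
--         return 0
--     if start > end:
--         return 0
--
--     if not(plus):
--         return F(start*2,end,history2,plus= False) + F(start+3,end,history2,plus = True)
--     else:
--         return F(start * 2, end, history2, plus=False)
-- ===== SOURCE B (Python) =====
-- def F(start=2, end=70, history=[], plus=False):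
--     # Iterative explicit-stack traversal; the history list is abstracted to three
--     # booleans (was 8/16/32 visited).  Return-value equivalent to A; does not
--     # mutate A's module-level set `alll`.
--     total = 0
--     stack = [(start, plus, 8 in history, 16 in history, 32 in history)]
--     while stack:
--         s, p, g8, g16, g32 = stack.pop()
--         if s == end:
--             if (g16 and g8) or g32:
--                 total += 1
--         elif s < end:
--             g8, g16, g32 = g8 or s == 8, g16 or s == 16, g32 or s == 32
--             stack.append((2 * s, False, g8, g16, g32))
--             if not p:
--                 stack.append((s + 3, True, g8, g16, g32))
--     return total
-- ===== Notes on version B (the rewrite author's own statement) =====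
-- stated objective: alternative
-- what changed: B replaces A's tree recursion over an ever-growing copied history list by an iterative explicit-stack loop whose state keeps just three booleans (whether 8/16/32 were visited) and an accumulator.
import Mathlib
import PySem

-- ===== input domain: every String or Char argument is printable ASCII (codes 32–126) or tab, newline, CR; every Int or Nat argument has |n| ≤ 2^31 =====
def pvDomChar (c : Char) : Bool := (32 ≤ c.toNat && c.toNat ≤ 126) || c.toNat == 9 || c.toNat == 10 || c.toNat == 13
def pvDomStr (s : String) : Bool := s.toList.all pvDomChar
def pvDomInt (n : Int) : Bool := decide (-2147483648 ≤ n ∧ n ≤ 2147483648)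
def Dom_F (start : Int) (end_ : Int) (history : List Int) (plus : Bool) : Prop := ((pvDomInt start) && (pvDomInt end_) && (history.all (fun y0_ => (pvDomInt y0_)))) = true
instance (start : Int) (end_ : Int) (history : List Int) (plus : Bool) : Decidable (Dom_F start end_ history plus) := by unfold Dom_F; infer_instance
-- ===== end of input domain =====

-- B replaces A's tree recursion over a copied history list by an iterative explicit-stack loop over
-- (s, plus, seen8, seen16, seen32) states; return-value equivalence only: A also inserts every visited
-- start into the module-level set `alll`, which B does not touch.

-- ===== PORT A =====
-- literal transliteration of A's recursion; the fuel only makes it total: under Pre_F every recursive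
-- call strictly increases `start`, so the initial fuel is never exhausted.  The `start < 1` branch is a
-- totality/feasibility guard only: it is reachable only outside Pre_F, where the Python recursion
-- diverges (RecursionError), so Python A never returns a value there.
-- (the `alll.add(start)` global side effect has no influence on the return value and is dropped.)
def FgoA : Nat → Int → Int → List Int → Bool → Int
  | 0, _, _, _, _ => 0
  | fuel+1, start, end_, history, plus =>
    let history2 := history ++ [start]
    if start = end_ ∧ ((16 ∈ history ∧ 8 ∈ history) ∨ 32 ∈ history) then 1
    else if start = end_ then 0
    else if start > end_ then 0
    else if start < 1 then 0  -- totality guard; Python diverges here (outside Pre_F)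
    else if !plus then
      FgoA fuel (start*2) end_ history2 false + FgoA fuel (start+3) end_ history2 true
    else
      FgoA fuel (start*2) end_ history2 false

def F (start : Int) (end_ : Int) (history : List Int) (plus : Bool) : Int :=
  FgoA ((end_ - start).toNat + 1) start end_ history plus

-- ===== PORT B =====
-- weight of a stack entry: the termination measure of the loop below (used only for termination)
def wt3 (e s : Int) : Nat := 3 ^ ((e - s).toNat + 1)

theorem wt3_pos (e s : Int) : 0 < wt3 e s := Nat.pow_pos (by norm_num)

theorem wt3_child_le (e s c : Int) (h2 : s < e) (hc : s + 1 ≤ c) :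
    wt3 e c ≤ 3 ^ (e - s).toNat := by
  unfold wt3
  exact Nat.pow_le_pow_right (by norm_num) (by omega)

theorem wt3_succ (e s : Int) : wt3 e s = 3 ^ (e - s).toNat * 3 := pow_succ 3 _

def wtB (end_ : Int) (x : Int × Bool × Bool × Bool × Bool) : Nat := wt3 end_ x.1


-- transliteration of Source B's while-loop: the stack's head is the top (Python pops from the end),
-- `acc` is `total`.  The `s < 1` case is a totality/feasibility guard only: it is reachable only
-- outside Pre_F, where the Python loop never terminates, so Python B returns no value there.
def FgoB (end_ : Int) (stack : List (Int × Bool × Bool × Bool × Bool)) (acc : Int) : Int :=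
  match stack with
  | [] => acc
  | (s, p, g8, g16, g32) :: rest =>
    if s = end_ then
      FgoB end_ rest (if (g16 && g8) || g32 then acc + 1 else acc)
    else if hlt : s < end_ then
      if hs1 : s < 1 then FgoB end_ rest acc
      else
        let g8' := g8 || s == 8
        let g16' := g16 || s == 16
        let g32' := g32 || s == 32
        FgoB end_ ((if !p then [((s+3 : Int), true, g8', g16', g32')] else []) ++ ((2*s : Int), false, g8', g16', g32') :: rest) acc
    else
      FgoB end_ rest acc
termination_by (stack.map (wtB end_)).sum
decreasing_by
  · simp only [List.map_cons, List.sum_cons, wtB]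
    have := wt3_pos end_ s
    omega
  · simp only [List.map_cons, List.sum_cons, wtB]
    have := wt3_pos end_ s
    omega
  · have ha := wt3_child_le end_ s (2*s) hlt (by omega)
    have hb := wt3_child_le end_ s (s+3) hlt (by omega)
    have hs := wt3_succ end_ s
    have hp : 0 < 3 ^ ((end_ - s).toNat) := Nat.pow_pos (by norm_num)
    cases p <;> simp [wtB] <;> omega
  · simp only [List.map_cons, List.sum_cons, wtB]
    have := wt3_pos end_ s
    omega

def F_alt (start : Int) (end_ : Int) (history : List Int) (plus : Bool) : Int :=
  FgoB end_ [(start, plus, decide (8 ∈ history), decide (16 ∈ history), decide (32 ∈ history))] 0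

-- ===== PRECONDITION & SPEC =====
-- Pre_F excludes exactly the inputs on which A never returns a value (Python RecursionError):
-- start ≤ 0 with start < end_, where the doubling branch recurses forever (0*2 = 0, negatives stay
-- below end_); B's while-loop diverges on the same inputs.
def Pre_F (start : Int) (end_ : Int) (history : List Int) (plus : Bool) : Prop :=
  1 ≤ start ∨ end_ ≤ start
instance (start : Int) (end_ : Int) (history : List Int) (plus : Bool) : Decidable (Pre_F start end_ history plus) := by unfold Pre_F; infer_instance
def pvWitness_F : Int × Int × List Int × Bool := (2, 70, [], false)

def Spec_F (start : Int) (end_ : Int) (history : List Int) (plus : Bool) (out : Int) : Prop := out = F_alt start end_ history plus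
instance (start : Int) (end_ : Int) (history : List Int) (plus : Bool) (out : Int) : Decidable (Spec_F start end_ history plus out) := by unfold Spec_F; infer_instance

-- ===== CLAIM (what is proved, stated in full; the proofs are below) =====
def Claim_equal_F : Prop := ∀ (start : Int) (end_ : Int) (history : List Int) (plus : Bool), Dom_F start end_ history plus → Pre_F start end_ history plus → Spec_F start end_ history plus (F start end_ history plus)

-- ===== LEMMAS AND PROOFS =====

-- reference function: A's recursion with the history list abstracted to the three flags
def Gspec (end_ : Int) (s : Int) (plus f8 f16 f32 : Bool) : Int :=
  if s = end_ then (if (f16 && f8) || f32 then 1 else 0)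
  else if end_ < s then 0
  else if s < 1 then 0
  else
    Gspec end_ (2*s) false (f8 || s == 8) (f16 || s == 16) (f32 || s == 32) +
    (if plus then 0 else Gspec end_ (s+3) true (f8 || s == 8) (f16 || s == 16) (f32 || s == 32))
termination_by (end_ - s).toNat
decreasing_by all_goals omega

theorem beq_int (a b : Int) : (a == b) = decide (a = b) := by
  by_cases h : a = b <;> simp [h]

theorem A_eq_G : ∀ (fuel : Nat) (s e : Int) (h : List Int) (p : Bool),
    (1 ≤ s ∨ e ≤ s) → (e - s).toNat < fuel →
    FgoA fuel s e h p = Gspec e s p (decide (8 ∈ h)) (decide (16 ∈ h)) (decide (32 ∈ h)) := by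
  intro fuel
  induction fuel with
  | zero => intro s e h p _ hf; omega
  | succ n ih =>
    intro s e h p hg hf
    rw [FgoA, Gspec]
    by_cases he : s = e
    · by_cases hc : (16 ∈ h ∧ 8 ∈ h) ∨ 32 ∈ h <;> simp [he, hc]
    · by_cases hgt : s > e
      · simp [he, hgt]
      · have hs1 : 1 ≤ s := by rcases hg with h1 | h1; exact h1; omega
        have h8 : decide (8 ∈ h ++ [s]) = (decide (8 ∈ h) || s == 8) := by
          simp [List.mem_append, eq_comm, Bool.or_comm, beq_int]
        have h16 : decide (16 ∈ h ++ [s]) = (decide (16 ∈ h) || s == 16) := by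
          simp [List.mem_append, eq_comm, Bool.or_comm, beq_int]
        have h32 : decide (32 ∈ h ++ [s]) = (decide (32 ∈ h) || s == 32) := by
          simp [List.mem_append, eq_comm, Bool.or_comm, beq_int]
        have r1 := ih (s*2) e (h ++ [s]) false (Or.inl (by omega)) (by omega)
        have r2 := ih (s+3) e (h ++ [s]) true (Or.inl (by omega)) (by omega)
        rw [h8, h16, h32, show s*2 = 2*s from by ring] at r1
        rw [h8, h16, h32] at r2
        cases p <;>
          simp [he, hgt, show ¬ e < s from by omega, show ¬ s < 1 from by omega,
            show s*2 = 2*s from by ring, r1, r2]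

theorem B_loop (e : Int) : ∀ (stack : List (Int × Bool × Bool × Bool × Bool)) (acc : Int),
    (∀ x ∈ stack, 1 ≤ x.1 ∨ e ≤ x.1) →
    FgoB e stack acc =
      acc + (stack.map (fun x => Gspec e x.1 x.2.1 x.2.2.1 x.2.2.2.1 x.2.2.2.2)).sum := by
  intro stack acc
  fun_induction FgoB e stack acc with
  | case1 acc => intro _; simp
  | case2 acc p g8 g16 g32 rest ih =>
    intro hstk
    have ih' := ih (fun x hx => hstk x (List.mem_cons_of_mem _ hx))
    simp only [dite_eq_ite] at ih'
    rw [ih']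
    have hg : Gspec e e p g8 g16 g32 = (if (g16 && g8 || g32) = true then (1:Int) else 0) := by
      rw [Gspec]; simp
    simp only [List.map_cons, List.sum_cons, hg]
    split_ifs <;> omega
  | case3 acc s p g8 g16 g32 rest hse hlt hs1 ih =>
    intro hstk
    rcases hstk _ List.mem_cons_self with h | h <;> omega
  | case4 acc s p g8 g16 g32 rest hse hlt hs1 g8x g16x g32x ih =>
    intro hstk
    have hyp : ∀ x ∈ (if h : (!p) = true then [((s+3 : Int), true, g8 || s == 8, g16 || s == 16, g32 || s == 32)] else []) ++
        ((2*s : Int), false, g8 || s == 8, g16 || s == 16, g32 || s == 32) :: rest, 1 ≤ x.1 ∨ e ≤ x.1 := by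
      intro x hx
      rcases List.mem_append.mp hx with hA | hB
      · by_cases hp : (!p) = true
        · simp only [hp, dite_true, List.mem_singleton] at hA
          subst hA; left; omega
        · simp only [hp, dite_false] at hA
          exact absurd hA (List.not_mem_nil)
      · rcases List.mem_cons.mp hB with h1 | h1
        · subst h1; left; omega
        · exact hstk _ (List.mem_cons_of_mem _ h1)
    have ih' := ih hyp
    simp only [dite_eq_ite] at ih'
    rw [ih']
    have hG : Gspec e s p g8 g16 g32 =
        Gspec e (2*s) false (g8 || s == 8) (g16 || s == 16) (g32 || s == 32) +
        (if p then 0 else Gspec e (s+3) true (g8 || s == 8) (g16 || s == 16) (g32 || s == 32)) := by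
      rw [Gspec, if_neg hse, if_neg (by omega), if_neg hs1]
    cases p <;>
      simp only [show g8x = (g8 || s == 8) from rfl, show g16x = (g16 || s == 16) from rfl,
        show g32x = (g32 || s == 32) from rfl, Bool.not_false, Bool.not_true, ite_true, ite_false,
        List.map_append, List.map_cons, List.map_nil, List.sum_append, List.sum_cons,
        List.sum_nil, List.nil_append, hG] <;>
      simp [show g8x = (g8 || s == 8) from rfl, show g16x = (g16 || s == 16) from rfl,
        show g32x = (g32 || s == 32) from rfl] <;> omega
  | case5 acc s p g8 g16 g32 rest hse hlt ih =>
    intro hstk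
    rw [ih (fun x hx => hstk x (List.mem_cons_of_mem _ hx))]
    have hg : Gspec e s p g8 g16 g32 = 0 := by
      rw [Gspec, if_neg hse, if_pos (by omega)]
    simp [hg]

-- ===== VERDICT =====
theorem F_spec : Claim_equal_F := by
  intro start end_ history plus _ hpre
  unfold Spec_F F F_alt
  rw [A_eq_G _ _ _ _ _ hpre (by omega)]
  rw [B_loop end_ _ 0 (by intro x hx; simp at hx; subst hx; exact hpre)]
  simp
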